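-- pv_equiv track=rewrite | github.com/JosephRiosHenao/CompetitiveProgramming | Codeforce/G/Subsequence Addition (Easy Version).py | resolve_test_case
-- ===== SOURCE A (Python) =====
-- def resolve_test_case(test_case):
--     if len(test_case) == 1 and test_case[0] == 1: return True
--     if len(test_case) == 1 and test_case[0] != 1: return False
--     resolve = 0
--     for idproblem, problem in enumerate(test_case):
--         for idn1, n1 in enumerate(test_case):
--             if idn1==idproblem: continue
--             combination = [n1]
--             if n1 == problem: resolve+=1;break
--             for idn2, n2 in enumerate(test_case):
--                 if idn2==idproblem or idn2==idn1: continue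
--                 combination.append(n2)
--                 if sum(combination) == problem:resolve+=1;break
--             if sum(combination) == problem: break
--     return True if resolve == len(test_case) else False
-- ===== SOURCE B (Python) =====
-- def resolve_test_case(test_case):
--     n = len(test_case)
--     if n == 1:
--         return test_case[0] == 1
--     for i, target in enumerate(test_case):
--         rest = test_case[:i] + test_case[i + 1:]
--         prefix = [0]
--         for x in rest:
--             prefix.append(prefix[-1] + x)
--         if target in rest:
--             continue
--         if target in prefix[2:]:
--             continue
--         seen = set()
--         ok = False
--         for p, x in enumerate(rest):
--             if p >= 1:
--                 seen.add(prefix[p])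
--             if target - x in seen:
--                 ok = True
--                 break
--         if not ok:
--             return False
--     return True
-- ===== Notes on version B (the rewrite author's own statement) =====
-- stated objective: faster
-- what changed: Instead of materializing candidate combinations and recomputing sum() in three nested scans, B removes each element once, builds the prefix-sum array of the remainder, and checks reachability by membership in the prefix list plus a growing hash set of prefix sums, using the identity that the sums reachable from a start element are exactly start+P[k] (k<=p) and P[t] (t>=p+2).
import Mathlib
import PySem

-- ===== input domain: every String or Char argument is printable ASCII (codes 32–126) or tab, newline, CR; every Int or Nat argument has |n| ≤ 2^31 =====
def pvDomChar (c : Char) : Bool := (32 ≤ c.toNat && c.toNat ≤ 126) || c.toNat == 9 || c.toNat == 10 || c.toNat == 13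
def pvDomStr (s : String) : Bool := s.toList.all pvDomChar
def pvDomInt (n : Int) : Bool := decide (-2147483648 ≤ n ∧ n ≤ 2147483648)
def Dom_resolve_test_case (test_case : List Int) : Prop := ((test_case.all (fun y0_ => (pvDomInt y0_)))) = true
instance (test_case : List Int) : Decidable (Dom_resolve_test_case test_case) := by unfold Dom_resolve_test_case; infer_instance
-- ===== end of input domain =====

-- B replaces A's three nested combination-building scans (with sum() recomputed each step)
-- by per-element prefix sums plus a growing set of reachable prefix sums (objective: faster).


-- ===== PORT A =====
-- innermost loop: 'for idn2, n2 in enumerate(test_case): … combination.append(n2); if sum(combination)==problem: resolve+=1; break'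
-- returns (final combination, whether the break-with-increment fired)
def pvLoop2 (idp idn1 problem : Int) : List (Int × Int) → List Int → (List Int × Bool)
  | [], comb => (comb, false)
  | (idn2, n2) :: rest, comb =>
    if idn2 = idp ∨ idn2 = idn1 then pvLoop2 idp idn1 problem rest comb
    else
      let comb' := comb ++ [n2]
      if comb'.sum = problem then (comb', true)
      else pvLoop2 idp idn1 problem rest comb'

-- middle loop over idn1, n1; returns whether resolve was incremented for this problem
def pvLoop1 (idp problem : Int) (all : List (Int × Int)) : List (Int × Int) → Bool
  | [] => false
  | (idn1, n1) :: rest =>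
    if idn1 = idp then pvLoop1 idp problem all rest
    else if n1 = problem then true
    else
      let r := pvLoop2 idp idn1 problem all [n1]
      if r.1.sum = problem then r.2      -- 'if sum(combination) == problem: break'
      else pvLoop1 idp problem all rest

-- outer loop accumulating the resolve counter
def pvLoopOuter (all : List (Int × Int)) : List (Int × Int) → Int → Int
  | [], resolve => resolve
  | (idp, problem) :: rest, resolve =>
    pvLoopOuter all rest (resolve + (if pvLoop1 idp problem all all then 1 else 0))

def resolve_test_case (test_case : List Int) : Bool :=
  if test_case.length = 1 ∧ test_case.getD 0 0 = 1 then true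
  else if test_case.length = 1 ∧ test_case.getD 0 0 ≠ 1 then false
  else
    let pairs := PySem.List.enumerate test_case 0
    decide (pvLoopOuter pairs pairs 0 = (test_case.length : Int))

-- ===== PORT B =====
-- 'seen' scan: for p, x in enumerate(rest): if p >= 1: seen.add(prefix[p]); if target - x in seen: ok = True; break
def pvScan (target : Int) (pfx : List Int) : List (Int × Int) → PySem.Set Int → Bool
  | [], _ => false
  | (p, x) :: rest, seen =>
    let seen' := if p ≥ 1 then PySem.Set.add seen (PySem.List.pyGetD pfx p 0) else seen
    if (target - x) ∈ seen' then true
    else pvScan target pfx rest seen'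

-- one iteration of B's outer loop: True = 'continue', False = 'return False'
def pvBodyB (test_case : List Int) (i target : Int) : Bool :=
  let rest := PySem.List.slice test_case none (some i) ++ PySem.List.slice test_case (some (i+1)) none
  let pfx := rest.foldl (fun P x => P ++ [PySem.List.pyGetD P (-1) 0 + x]) [0]
  if target ∈ rest then true
  else if target ∈ PySem.List.slice pfx (some 2) none then true
  else pvScan target pfx (PySem.List.enumerate rest 0) PySem.Set.empty

def pvAllB (test_case : List Int) : List (Int × Int) → Bool
  | [] => true
  | (i, target) :: rest => if pvBodyB test_case i target then pvAllB test_case rest else false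

def resolve_test_case_alt (test_case : List Int) : Bool :=
  if test_case.length = 1 then decide (test_case.getD 0 0 = 1)
  else pvAllB test_case (PySem.List.enumerate test_case 0)

-- ===== PRECONDITION & SPEC =====
def Spec_resolve_test_case (test_case : List Int) (out : Bool) : Prop := out = resolve_test_case_alt test_case
instance (test_case : List Int) (out : Bool) : Decidable (Spec_resolve_test_case test_case out) := by unfold Spec_resolve_test_case; infer_instance

-- ===== CLAIM (what is proved, stated in full; the proofs are below) =====
def Claim_equal_resolve_test_case : Prop := ∀ (test_case : List Int), Dom_resolve_test_case test_case → Spec_resolve_test_case test_case (resolve_test_case test_case)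

-- ===== LEMMAS AND PROOFS =====

-- proof-side helpers: skip-free versions of A's loops and prefix sums
def pvRun (prob : Int) : List Int → List Int → (List Int × Bool)
  | [], comb => (comb, false)
  | x :: rest, comb =>
    let comb' := comb ++ [x]
    if comb'.sum = prob then (comb', true) else pvRun prob rest comb'

def pvRem (a b : Int) : List Int → Int → List Int
  | [], _ => []
  | x :: t, s => if s = a ∨ s = b then pvRem a b t (s+1) else x :: pvRem a b t (s+1)

def pvPS (c : Int) : List Int → List Int
  | [] => []
  | x :: t => (c + x) :: pvPS (c + x) t

-- A's innermost loop "hit" flag is equivalent to the post-loop sum test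
theorem pvLoop2_hit_iff (a b prob : Int) (l : List (Int × Int)) (comb : List Int)
    (h : comb.sum ≠ prob) :
    ((pvLoop2 a b prob l comb).2 = true ↔ (pvLoop2 a b prob l comb).1.sum = prob) := by
  induction l generalizing comb with
  | nil => simp [pvLoop2, h]
  | cons q rest ih =>
    obtain ⟨idn2, n2⟩ := q
    by_cases hs : idn2 = a ∨ idn2 = b
    · simp only [pvLoop2, if_pos hs]
      exact ih comb h
    · simp only [pvLoop2, if_neg hs]
      by_cases hsum : (comb ++ [n2]).sum = prob
      · simp [hsum]
      · simp only [if_neg hsum]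
        exact ih _ hsum

theorem pvLoop2_eq_run (a b prob : Int) (tc : List Int) (s : Int) (comb : List Int) :
    pvLoop2 a b prob (PySem.List.enumerate tc s) comb = pvRun prob (pvRem a b tc s) comb := by
  induction tc generalizing s comb with
  | nil => simp [PySem.List.enumerate, pvLoop2, pvRem, pvRun]
  | cons x t ih =>
    rw [PySem.List.enumerate_cons]
    by_cases hs : s = a ∨ s = b
    · simp only [pvLoop2, pvRem, if_pos hs]
      exact ih (s+1) comb
    · simp only [pvLoop2, pvRem, if_neg hs, pvRun]
      by_cases hsum : (comb ++ [x]).sum = prob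
      · simp [hsum]
      · simp only [if_neg hsum]
        exact ih (s+1) _

theorem pvRun_hit_iff (prob : Int) (l : List Int) (comb : List Int) :
    (pvRun prob l comb).2 = true ↔
      ∃ k : Nat, 1 ≤ k ∧ k ≤ l.length ∧ comb.sum + (l.take k).sum = prob := by
  induction l generalizing comb with
  | nil => simp [pvRun]
  | cons x t ih =>
    simp only [pvRun]
    by_cases hsum : (comb ++ [x]).sum = prob
    · simp only [if_pos hsum]
      constructor
      · intro _
        refine ⟨1, le_refl 1, by simp, ?_⟩
        simpa using hsum
      · intro _; trivial
    · simp only [if_neg hsum, ih]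
      constructor
      · rintro ⟨k, hk1, hk2, hk3⟩
        refine ⟨k + 1, by omega, by simp only [List.length_cons]; omega, ?_⟩
        simp only [List.take_succ_cons, List.sum_cons]
        simp only [List.sum_append, List.sum_cons, List.sum_nil] at hk3
        linarith
      · rintro ⟨k, hk1, hk2, hk3⟩
        match k, hk1 with
        | 1, _ =>
          exfalso
          simp only [List.take_succ_cons, List.take_zero, List.sum_cons, List.sum_nil] at hk3
          simp only [List.sum_append, List.sum_cons, List.sum_nil] at hsum
          apply hsum; linarith
        | (k' + 2), _ =>
          refine ⟨k' + 1, by omega, by simp only [List.length_cons] at hk2; omega, ?_⟩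
          simp only [List.take_succ_cons, List.sum_cons] at hk3
          simp only [List.sum_append, List.sum_cons, List.sum_nil]
          linarith

theorem pvRem_none (a b : Int) (t : List Int) (s : Int) (ha : a < s) (hb : b < s) :
    pvRem a b t s = t := by
  induction t generalizing s with
  | nil => rfl
  | cons x t ih =>
    simp only [pvRem, if_neg (by rintro (rfl | rfl) <;> omega : ¬(s = a ∨ s = b))]
    rw [ih (s+1) (by omega) (by omega)]

theorem pvRem_b (a : Int) (t : List Int) (s : Int) (v : Nat) (ha : a < s) :
    pvRem a (s + v) t s = t.eraseIdx v := by
  induction t generalizing s v with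
  | nil => simp [pvRem]
  | cons x t ih =>
    match v with
    | 0 =>
      have h0 : s + ((0 : Nat) : Int) = s := by push_cast; ring
      rw [h0]
      simp only [pvRem]
      rw [if_pos (Or.inr trivial)]
      rw [pvRem_none a s t (s+1) (by omega) (by omega), List.eraseIdx_cons_zero]
    | v' + 1 =>
      have hne : ¬(s = a ∨ s = s + ((v' + 1 : Nat) : Int)) := by
        rintro (rfl | hc)
        · omega
        · push_cast at hc; omega
      simp only [pvRem]
      rw [if_neg hne]
      have harg : s + ((v' + 1 : Nat) : Int) = (s + 1) + (v' : Int) := by push_cast; ring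
      rw [harg, ih (s+1) v' (by omega), List.eraseIdx_cons_succ]

theorem pvRem_a (b : Int) (t : List Int) (s : Int) (u : Nat) (hb : b < s) :
    pvRem (s + u) b t s = t.eraseIdx u := by
  induction t generalizing s u with
  | nil => simp [pvRem]
  | cons x t ih =>
    match u with
    | 0 =>
      have h0 : s + ((0 : Nat) : Int) = s := by push_cast; ring
      rw [h0]
      simp only [pvRem]
      rw [if_pos (Or.inl trivial)]
      rw [pvRem_none s b t (s+1) (by omega) (by omega), List.eraseIdx_cons_zero]
    | u' + 1 =>
      have hne : ¬(s = s + ((u' + 1 : Nat) : Int) ∨ s = b) := by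
        rintro (hc | rfl)
        · push_cast at hc; omega
        · omega
      simp only [pvRem]
      rw [if_neg hne]
      have harg : s + ((u' + 1 : Nat) : Int) = (s + 1) + (u' : Int) := by push_cast; ring
      rw [harg, ih (s+1) u' (by omega), List.eraseIdx_cons_succ]

theorem pvRem_two (t : List Int) (s : Int) (u v : Nat) (huv : u ≠ v) :
    pvRem (s + u) (s + v) t s = (t.eraseIdx u).eraseIdx (if v < u then v else v - 1) := by
  induction t generalizing s u v with
  | nil => simp [pvRem]
  | cons x t ih =>
    match u, v with
    | 0, v =>
      have hv : 1 ≤ v := by omega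
      have h0 : s + ((0 : Nat) : Int) = s := by push_cast; ring
      rw [h0]
      simp only [pvRem]
      rw [if_pos (Or.inl trivial)]
      have harg : s + (v : Int) = (s + 1) + ((v - 1 : Nat) : Int) := by omega
      rw [harg, pvRem_b s t (s+1) (v-1) (by omega), List.eraseIdx_cons_zero,
        if_neg (by omega : ¬ v < 0)]
    | u' + 1, 0 =>
      have h0 : s + ((0 : Nat) : Int) = s := by push_cast; ring
      rw [h0]
      simp only [pvRem]
      rw [if_pos (Or.inr trivial)]
      have harg : s + ((u' + 1 : Nat) : Int) = (s + 1) + (u' : Int) := by push_cast; ring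
      rw [harg, pvRem_a s t (s+1) u' (by omega), if_pos (by omega : 0 < u' + 1),
        List.eraseIdx_cons_succ, List.eraseIdx_cons_zero]
    | u' + 1, v' + 1 =>
      have hne : ¬(s = s + ((u' + 1 : Nat) : Int) ∨ s = s + ((v' + 1 : Nat) : Int)) := by
        rintro (hc | hc) <;> (push_cast at hc; omega)
      simp only [pvRem]
      rw [if_neg hne]
      have h1 : s + ((u' + 1 : Nat) : Int) = (s + 1) + (u' : Int) := by push_cast; ring
      have h2 : s + ((v' + 1 : Nat) : Int) = (s + 1) + (v' : Int) := by push_cast; ring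
      rw [h1, h2, ih (s+1) u' v' (by omega), List.eraseIdx_cons_succ]
      by_cases hlt : v' < u'
      · rw [if_pos hlt, if_pos (by omega : v' + 1 < u' + 1), List.eraseIdx_cons_succ]
      · obtain ⟨v'', rfl⟩ : ∃ v'', v' = v'' + 1 := ⟨v' - 1, by omega⟩
        rw [if_neg hlt, if_neg (by omega : ¬ v'' + 1 + 1 < u' + 1)]
        have e1 : v'' + 1 + 1 - 1 = v'' + 1 := by omega
        rw [e1, List.eraseIdx_cons_succ]
        have e2 : v'' + 1 - 1 = v'' := by omega
        rw [e2]

theorem pvLoop1_any (a prob : Int) (all l : List (Int × Int)) :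
    pvLoop1 a prob all l =
      l.any (fun q => decide (q.1 ≠ a) &&
        (decide (q.2 = prob) || (pvLoop2 a q.1 prob all [q.2]).2)) := by
  induction l with
  | nil => simp [pvLoop1]
  | cons q rest ih =>
    obtain ⟨idn1, n1⟩ := q
    simp only [pvLoop1, List.any_cons]
    by_cases h1 : idn1 = a
    · simp [h1, ih]
    · by_cases h2 : n1 = prob
      · simp [h1, h2]
      · simp only [if_neg h1, if_neg h2]
        have hsum : ([n1] : List Int).sum ≠ prob := by simpa using h2
        have hiff := pvLoop2_hit_iff a idn1 prob all [n1] hsum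
        by_cases hh : (pvLoop2 a idn1 prob all [n1]).2 = true
        · rw [if_pos (hiff.mp hh)]
          simp [h1, h2, hh]
        · have hns : (pvLoop2 a idn1 prob all [n1]).1.sum ≠ prob := fun hc => hh (hiff.mpr hc)
          rw [if_neg hns, ih]
          simp only [Bool.not_eq_true] at hh
          simp [h1, h2, hh]

theorem pvLoopOuter_count (all l : List (Int × Int)) (r : Int) :
    pvLoopOuter all l r = r + (l.countP (fun q => pvLoop1 q.1 q.2 all all) : Int) := by
  induction l generalizing r with
  | nil => simp [pvLoopOuter]
  | cons q rest ih =>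
    obtain ⟨idp, problem⟩ := q
    simp only [pvLoopOuter, List.countP_cons, ih]
    by_cases hp : pvLoop1 idp problem all all
    · simp [hp]; ring
    · simp [hp]

theorem mem_enumerate_iff (q : Int × Int) (tc : List Int) (s : Int) :
    q ∈ PySem.List.enumerate tc s ↔
      ∃ p : Nat, p < tc.length ∧ q = (s + p, tc.getD p 0) := by
  induction tc generalizing s with
  | nil => simp [PySem.List.enumerate]
  | cons x t ih =>
    rw [PySem.List.enumerate_cons, List.mem_cons, ih (s+1)]
    constructor
    · rintro (rfl | ⟨p, hp, rfl⟩)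
      · exact ⟨0, by simp, by simp⟩
      · refine ⟨p + 1, by simp only [List.length_cons]; omega, ?_⟩
        simp only [List.getD_cons_succ]
        have : s + 1 + (p : Int) = s + ((p + 1 : Nat) : Int) := by push_cast; ring
        rw [this]
    · rintro ⟨p, hp, rfl⟩
      match p with
      | 0 => exact Or.inl (by simp)
      | p' + 1 =>
        refine Or.inr ⟨p', by simp only [List.length_cons] at hp; omega, ?_⟩
        simp only [List.getD_cons_succ]
        have : s + ((p' + 1 : Nat) : Int) = s + 1 + (p' : Int) := by push_cast; ring
        rw [this]

theorem pvAllB_all (tc : List Int) (l : List (Int × Int)) :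
    pvAllB tc l = l.all (fun q => pvBodyB tc q.1 q.2) := by
  induction l with
  | nil => simp [pvAllB]
  | cons q rest ih =>
    obtain ⟨i, target⟩ := q
    simp only [pvAllB, List.all_cons, ih]
    by_cases hb : pvBodyB tc i target <;> simp [hb]

theorem pfx_fold (l : List Int) (acc : List Int) (c : Int) (h : acc.getLast? = some c) :
    l.foldl (fun P x => P ++ [PySem.List.pyGetD P (-1) 0 + x]) acc = acc ++ pvPS c l := by
  induction l generalizing acc c with
  | nil => simp [pvPS]
  | cons x t ih =>
    have hne : acc ≠ [] := by rintro rfl; simp at h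
    simp only [List.foldl_cons]
    rw [PySem.List.pyGetD_neg_one acc 0 hne]
    have hc : acc.getLast hne = c := by
      rw [List.getLast?_eq_some_getLast hne] at h
      exact Option.some.inj h
    rw [hc, ih (acc ++ [c + x]) (c + x) (by simp)]
    simp [pvPS]

theorem pvPS_getD (c : Int) (l : List Int) (k : Nat) (h : k < l.length) :
    (pvPS c l).getD k 0 = c + (l.take (k + 1)).sum := by
  induction l generalizing c k with
  | nil => simp at h
  | cons x t ih =>
    match k with
    | 0 => simp [pvPS]
    | k' + 1 =>
      simp only [pvPS, List.getD_cons_succ, List.take_succ_cons, List.sum_cons]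
      rw [ih (c + x) k' (by simp only [List.length_cons] at h; omega)]
      ring

theorem pvPS_mem (c : Int) (l : List Int) (y : Int) :
    y ∈ pvPS c l ↔ ∃ k : Nat, k < l.length ∧ y = c + (l.take (k + 1)).sum := by
  induction l generalizing c with
  | nil => simp [pvPS]
  | cons x t ih =>
    simp only [pvPS, List.mem_cons, ih]
    constructor
    · rintro (rfl | ⟨k, hk, rfl⟩)
      · exact ⟨0, by simp, by simp⟩
      · refine ⟨k + 1, by simp only [List.length_cons]; omega, ?_⟩
        simp only [List.take_succ_cons, List.sum_cons]
        ring
    · rintro ⟨k, hk, rfl⟩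
      match k with
      | 0 => simp
      | k' + 1 =>
        refine Or.inr ⟨k', by simp only [List.length_cons] at hk; omega, ?_⟩
        simp only [List.take_succ_cons, List.sum_cons]
        ring

theorem pvScan_iff (tgt : Int) (pfx : List Int) (l : List Int) (s : Nat) (seen : PySem.Set Int) :
    pvScan tgt pfx (PySem.List.enumerate l (s : Int)) seen = true ↔
      ∃ p : Nat, p < l.length ∧
        ((tgt - l.getD p 0) ∈ seen ∨
         ∃ j : Nat, 1 ≤ j ∧ s ≤ j ∧ j ≤ s + p ∧
           PySem.List.pyGetD pfx (j : Int) 0 = tgt - l.getD p 0) := by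
  induction l generalizing s seen with
  | nil => simp [PySem.List.enumerate, pvScan]
  | cons x t ih =>
    rw [PySem.List.enumerate_cons]
    simp only [pvScan]
    have hs1 : ((s : Int) + 1) = ((s + 1 : Nat) : Int) := by push_cast; ring
    by_cases hge : (s : Int) ≥ 1
    · have hs : 1 ≤ s := by exact_mod_cast hge
      simp only [if_pos hge]
      set seen' := PySem.Set.add seen (PySem.List.pyGetD pfx (s : Int) 0) with hseen'
      by_cases hmem : (tgt - x) ∈ seen'
      · simp only [if_pos hmem, true_iff]
        refine ⟨0, by simp, ?_⟩
        simp only [List.getD_cons_zero]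
        rcases (PySem.Set.mem_add _ _ _).mp hmem with hin | heq
        · exact Or.inl hin
        · exact Or.inr ⟨s, hs, le_refl s, by omega, heq.symm⟩
      · simp only [if_neg hmem]
        rw [hs1, ih (s + 1) seen']
        constructor
        · rintro ⟨p, hp, hcond⟩
          refine ⟨p + 1, by simp only [List.length_cons]; omega, ?_⟩
          simp only [List.getD_cons_succ]
          rcases hcond with hin | ⟨j, hj1, hj2, hj3, hj4⟩
          · rcases (PySem.Set.mem_add _ _ _).mp hin with hin' | heq
            · exact Or.inl hin'
            · exact Or.inr ⟨s, hs, le_refl s, by omega, heq.symm ▸ rfl⟩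
          · exact Or.inr ⟨j, hj1, by omega, by omega, hj4⟩
        · rintro ⟨p, hp, hcond⟩
          match p with
          | 0 =>
            exfalso
            apply hmem
            simp only [List.getD_cons_zero] at hcond
            rcases hcond with hin | ⟨j, hj1, hj2, hj3, hj4⟩
            · exact (PySem.Set.mem_add _ _ _).mpr (Or.inl hin)
            · have : j = s := by omega
              subst this
              exact (PySem.Set.mem_add _ _ _).mpr (Or.inr hj4.symm)
          | p' + 1 =>
            refine ⟨p', by simp only [List.length_cons] at hp; omega, ?_⟩
            simp only [List.getD_cons_succ] at hcond
            rcases hcond with hin | ⟨j, hj1, hj2, hj3, hj4⟩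
            · exact Or.inl ((PySem.Set.mem_add _ _ _).mpr (Or.inl hin))
            · by_cases hjs : j = s
              · subst hjs
                exact Or.inl ((PySem.Set.mem_add _ _ _).mpr (Or.inr hj4.symm))
              · exact Or.inr ⟨j, hj1, by omega, by omega, hj4⟩
    · have hs : s = 0 := by omega
      subst hs
      simp only [if_neg hge]
      by_cases hmem : (tgt - x) ∈ seen
      · simp only [if_pos hmem, true_iff]
        exact ⟨0, by simp, Or.inl (by simpa using hmem)⟩
      · simp only [if_neg hmem]
        rw [hs1, ih 1 seen]
        constructor
        · rintro ⟨p, hp, hcond⟩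
          refine ⟨p + 1, by simp only [List.length_cons]; omega, ?_⟩
          simp only [List.getD_cons_succ]
          rcases hcond with hin | ⟨j, hj1, hj2, hj3, hj4⟩
          · exact Or.inl hin
          · exact Or.inr ⟨j, hj1, by omega, by omega, hj4⟩
        · rintro ⟨p, hp, hcond⟩
          match p with
          | 0 =>
            exfalso
            simp only [List.getD_cons_zero] at hcond
            rcases hcond with hin | ⟨j, hj1, hj2, hj3, hj4⟩
            · exact hmem (by simpa using hin)
            · omega
          | p' + 1 =>
            refine ⟨p', by simp only [List.length_cons] at hp; omega, ?_⟩
            simp only [List.getD_cons_succ] at hcond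
            rcases hcond with hin | ⟨j, hj1, hj2, hj3, hj4⟩
            · exact Or.inl hin
            · exact Or.inr ⟨j, hj1, by omega, by omega, hj4⟩

theorem erase_take_sum_le (l : List Int) (p k : Nat) (hk : k ≤ p) :
    ((l.eraseIdx p).take k).sum = (l.take k).sum := by
  induction l generalizing p k with
  | nil => simp
  | cons x t ih =>
    match p, k with
    | _, 0 => simp
    | p' + 1, k' + 1 =>
      simp only [List.eraseIdx_cons_succ, List.take_succ_cons, List.sum_cons]
      rw [ih p' k' (by omega)]

theorem erase_take_sum_gt (l : List Int) (p k : Nat) (hp : p < l.length) (hk : p < k) :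
    ((l.eraseIdx p).take k).sum = (l.take (k + 1)).sum - l.getD p 0 := by
  induction l generalizing p k with
  | nil => simp at hp
  | cons x t ih =>
    match p, k with
    | 0, k =>
      simp only [List.eraseIdx_cons_zero, List.take_succ_cons, List.sum_cons,
        List.getD_cons_zero]
      ring
    | p' + 1, k' + 1 =>
      simp only [List.eraseIdx_cons_succ, List.take_succ_cons, List.sum_cons,
        List.getD_cons_succ]
      rw [ih p' k' (by simp only [List.length_cons] at hp; omega) (by omega)]
      ring


theorem mem_getD_iff (l : List Int) (y : Int) :
    y ∈ l ↔ ∃ p : Nat, p < l.length ∧ l.getD p 0 = y := by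
  rw [List.mem_iff_getElem]
  constructor
  · rintro ⟨n, h, rfl⟩
    exact ⟨n, h, List.getD_eq_getElem l 0 h⟩
  · rintro ⟨p, hp, rfl⟩
    exact ⟨p, hp, (List.getD_eq_getElem l 0 hp).symm⟩

theorem erase_getD (l : List Int) (u p : Nat) (hu : u < l.length) (hp : p + 1 < l.length) :
    (l.eraseIdx u).getD p 0 = if p < u then l.getD p 0 else l.getD (p + 1) 0 := by
  induction l generalizing u p with
  | nil => simp at hu
  | cons x t ih =>
    match u, p with
    | 0, p => simp
    | u' + 1, 0 => simp
    | u' + 1, p' + 1 =>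
      simp only [List.eraseIdx_cons_succ, List.getD_cons_succ]
      rw [ih u' p' (by simp only [List.length_cons] at hu; omega)
        (by simp only [List.length_cons] at hp; omega)]
      by_cases h : p' < u'
      · rw [if_pos h, if_pos (by omega : p' + 1 < u' + 1)]
      · rw [if_neg h, if_neg (by omega : ¬ p' + 1 < u' + 1)]

theorem pick_v (tc : List Int) (u p : Nat) (hu : u < tc.length) (hp : p < tc.length - 1) :
    ∃ v : Nat, v < tc.length ∧ v ≠ u ∧ (if v < u then v else v - 1) = p ∧
      tc.getD v 0 = (tc.eraseIdx u).getD p 0 := by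
  by_cases hpu : p < u
  · refine ⟨p, by omega, by omega, by rw [if_pos hpu], ?_⟩
    rw [erase_getD tc u p hu (by omega), if_pos hpu]
  · refine ⟨p + 1, by omega, by omega, ?_, ?_⟩
    · rw [if_neg (by omega : ¬ p + 1 < u)]
      omega
    · rw [erase_getD tc u p hu (by omega), if_neg hpu]

theorem pick_p (tc : List Int) (u v : Nat) (hu : u < tc.length) (hv : v < tc.length)
    (hvu : v ≠ u) :
    ∃ p : Nat, p < tc.length - 1 ∧ (if v < u then v else v - 1) = p ∧
      tc.getD v 0 = (tc.eraseIdx u).getD p 0 := by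
  by_cases hvlt : v < u
  · refine ⟨v, by omega, by rw [if_pos hvlt], ?_⟩
    rw [erase_getD tc u v hu (by omega), if_pos hvlt]
  · refine ⟨v - 1, by omega, by rw [if_neg hvlt], ?_⟩
    rw [erase_getD tc u (v - 1) hu (by omega), if_neg (by omega : ¬ v - 1 < u)]
    have hvv : v - 1 + 1 = v := by omega
    rw [hvv]

theorem drop1_PS_mem (l : List Int) (y : Int) :
    y ∈ (pvPS 0 l).drop 1 ↔ ∃ t : Nat, 2 ≤ t ∧ t ≤ l.length ∧ (l.take t).sum = y := by
  cases l with
  | nil => simp [pvPS]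
  | cons x t0 =>
    simp only [pvPS, List.drop_succ_cons, List.drop_zero, pvPS_mem]
    constructor
    · rintro ⟨k, hk, rfl⟩
      refine ⟨k + 2, by omega, by simp only [List.length_cons]; omega, ?_⟩
      simp only [List.take_succ_cons, List.sum_cons]
      ring
    · rintro ⟨t, ht2, htm, rfl⟩
      obtain ⟨k, rfl⟩ : ∃ k, t = k + 2 := ⟨t - 2, by omega⟩
      refine ⟨k, by simp only [List.length_cons] at htm; omega, ?_⟩
      simp only [List.take_succ_cons, List.sum_cons]
      ring

theorem bodyB_iff (tc : List Int) (u : Nat) (hu : u < tc.length) :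
    pvBodyB tc (u : Int) (tc.getD u 0) = true ↔
      (tc.getD u 0) ∈ tc.eraseIdx u ∨
      (∃ t : Nat, 2 ≤ t ∧ t ≤ (tc.eraseIdx u).length ∧
        ((tc.eraseIdx u).take t).sum = tc.getD u 0) ∨
      (∃ p k : Nat, p < (tc.eraseIdx u).length ∧ 1 ≤ k ∧ k ≤ p ∧
        (tc.eraseIdx u).getD p 0 + ((tc.eraseIdx u).take k).sum = tc.getD u 0) := by
  have hrest : PySem.List.slice tc none (some (u : Int)) ++
      PySem.List.slice tc (some ((u : Int) + 1)) none = tc.eraseIdx u := by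
    rw [PySem.List.slice_to_natCast]
    have hcast : ((u : Int) + 1) = ((u + 1 : Nat) : Int) := by push_cast; ring
    rw [hcast, PySem.List.slice_from_natCast]
    exact (List.eraseIdx_eq_take_drop_succ tc u).symm
  have hpfx : (tc.eraseIdx u).foldl (fun P x => P ++ [PySem.List.pyGetD P (-1) 0 + x]) [0]
      = 0 :: pvPS 0 (tc.eraseIdx u) := by
    rw [pfx_fold _ [0] 0 (by simp)]
    rfl
  simp only [pvBodyB, hrest, hpfx]
  have hc2iff : tc.getD u 0 ∈ PySem.List.slice (0 :: pvPS 0 (tc.eraseIdx u)) (some 2) none ↔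
      ∃ t : Nat, 2 ≤ t ∧ t ≤ (tc.eraseIdx u).length ∧
        ((tc.eraseIdx u).take t).sum = tc.getD u 0 := by
    rw [PySem.List.slice_from (0 :: pvPS 0 (tc.eraseIdx u)) (by norm_num : (0:Int) ≤ 2)]
    have h2 : ((2 : Int)).toNat = 2 := rfl
    rw [h2]
    have hdrop : (0 :: pvPS 0 (tc.eraseIdx u)).drop 2 = (pvPS 0 (tc.eraseIdx u)).drop 1 := by
      rfl
    rw [hdrop, drop1_PS_mem]
  have hscan : pvScan (tc.getD u 0) (0 :: pvPS 0 (tc.eraseIdx u))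
      (PySem.List.enumerate (tc.eraseIdx u) 0) PySem.Set.empty = true ↔
      ∃ p k : Nat, p < (tc.eraseIdx u).length ∧ 1 ≤ k ∧ k ≤ p ∧
        (tc.eraseIdx u).getD p 0 + ((tc.eraseIdx u).take k).sum = tc.getD u 0 := by
    have hps := pvScan_iff (tc.getD u 0) (0 :: pvPS 0 (tc.eraseIdx u)) (tc.eraseIdx u) 0
      PySem.Set.empty
    simp only [Nat.cast_zero] at hps
    rw [hps]
    constructor
    · rintro ⟨p, hp, hcond⟩
      rcases hcond with hin | ⟨j, hj1, _, hj3, hj4⟩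
      · simp [PySem.Set.empty] at hin
      · refine ⟨p, j, hp, hj1, by omega, ?_⟩
        rw [PySem.List.pyGetD_natCast] at hj4
        obtain ⟨j', rfl⟩ : ∃ j', j = j' + 1 := ⟨j - 1, by omega⟩
        rw [List.getD_cons_succ, pvPS_getD 0 (tc.eraseIdx u) j' (by omega)] at hj4
        linarith
    · rintro ⟨p, k, hp, hk1, hkp, hsum⟩
      refine ⟨p, hp, Or.inr ⟨k, hk1, by omega, by omega, ?_⟩⟩
      rw [PySem.List.pyGetD_natCast]
      obtain ⟨k', rfl⟩ : ∃ k', k = k' + 1 := ⟨k - 1, by omega⟩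
      rw [List.getD_cons_succ, pvPS_getD 0 (tc.eraseIdx u) k' (by omega)]
      linarith
  by_cases hc1 : (tc.getD u 0) ∈ tc.eraseIdx u
  · rw [if_pos hc1]
    exact iff_of_true rfl (Or.inl hc1)
  · rw [if_neg hc1]
    by_cases hc2 : (tc.getD u 0) ∈ PySem.List.slice (0 :: pvPS 0 (tc.eraseIdx u)) (some 2) none
    · rw [if_pos hc2]
      exact iff_of_true rfl (Or.inr (Or.inl (hc2iff.mp hc2)))
    · rw [if_neg hc2, hscan]
      constructor
      · exact fun h => Or.inr (Or.inr h)
      · rintro (h | h | h)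
        · exact absurd h hc1
        · exact absurd (hc2iff.mpr h) hc2
        · exact h

-- characterization of A's per-element search
theorem loop1_iff (tc : List Int) (u : Nat) (hu : u < tc.length) :
    pvLoop1 (u : Int) (tc.getD u 0) (PySem.List.enumerate tc 0) (PySem.List.enumerate tc 0) = true ↔
      ∃ v : Nat, v < tc.length ∧ v ≠ u ∧
        (tc.getD v 0 = tc.getD u 0 ∨
         ∃ k : Nat, 1 ≤ k ∧ k ≤ ((tc.eraseIdx u).eraseIdx (if v < u then v else v - 1)).length ∧
           tc.getD v 0 + (((tc.eraseIdx u).eraseIdx (if v < u then v else v - 1)).take k).sum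
             = tc.getD u 0) := by
  rw [pvLoop1_any, List.any_eq_true]
  constructor
  · rintro ⟨q, hq, hpred⟩
    rcases (mem_enumerate_iff q tc 0).mp hq with ⟨v, hv, rfl⟩
    simp only [Bool.and_eq_true, Bool.or_eq_true, decide_eq_true_eq] at hpred
    obtain ⟨hne, hcase⟩ := hpred
    simp only [zero_add] at hne hcase
    have hvu : v ≠ u := fun h => hne (by exact_mod_cast congrArg (Nat.cast : Nat → Int) h)
    refine ⟨v, hv, hvu, ?_⟩
    rcases hcase with h | h
    · exact Or.inl h
    · right
      rw [pvLoop2_eq_run] at h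
      have hrem := pvRem_two tc 0 u v (fun hh => hvu hh.symm)
      simp only [zero_add] at hrem
      rw [hrem, pvRun_hit_iff] at h
      rcases h with ⟨k, hk1, hk2, hk3⟩
      refine ⟨k, hk1, hk2, ?_⟩
      simp only [List.sum_cons, List.sum_nil] at hk3
      linarith
  · rintro ⟨v, hv, hvu, hcase⟩
    refine ⟨((v : Int), tc.getD v 0), (mem_enumerate_iff _ tc 0).mpr ⟨v, hv, by simp⟩, ?_⟩
    simp only [Bool.and_eq_true, Bool.or_eq_true, decide_eq_true_eq]
    refine ⟨by exact_mod_cast hvu, ?_⟩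
    rcases hcase with h | ⟨k, hk1, hk2, hk3⟩
    · exact Or.inl h
    · right
      rw [pvLoop2_eq_run]
      have hrem := pvRem_two tc 0 u v (fun hh => hvu hh.symm)
      simp only [zero_add] at hrem
      rw [hrem, pvRun_hit_iff]
      refine ⟨k, hk1, hk2, ?_⟩
      simp only [List.sum_cons, List.sum_nil]
      linarith

-- the core per-index equivalence
theorem core_eq (tc : List Int) (u : Nat) (hu : u < tc.length) :
    pvLoop1 (u : Int) (tc.getD u 0) (PySem.List.enumerate tc 0) (PySem.List.enumerate tc 0)
      = pvBodyB tc (u : Int) (tc.getD u 0) := by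
  rw [Bool.eq_iff_iff, loop1_iff tc u hu, bodyB_iff tc u hu]
  have hm : (tc.eraseIdx u).length = tc.length - 1 := List.length_eraseIdx_of_lt hu
  constructor
  · rintro ⟨v, hv, hvu, hcase⟩
    obtain ⟨p, hp, hpeq, hgd⟩ := pick_p tc u v hu hv hvu
    rw [hpeq] at hcase
    have hp' : p < (tc.eraseIdx u).length := by omega
    rcases hcase with h | ⟨k, hk1, hk2, hk3⟩
    · exact Or.inl ((mem_getD_iff _ _).mpr ⟨p, hp', by rw [← hgd, h]⟩)
    · have hlen2 : ((tc.eraseIdx u).eraseIdx p).length = (tc.eraseIdx u).length - 1 :=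
        List.length_eraseIdx_of_lt hp'
      by_cases hkp : k ≤ p
      · refine Or.inr (Or.inr ⟨p, k, hp', hk1, hkp, ?_⟩)
        rw [erase_take_sum_le _ p k hkp] at hk3
        rw [← hgd]
        exact hk3
      · refine Or.inr (Or.inl ⟨k + 1, by omega, by omega, ?_⟩)
        rw [erase_take_sum_gt _ p k hp' (by omega)] at hk3
        rw [hgd] at hk3
        linarith
  · rintro (h | ⟨t, ht2, htm, hts⟩ | ⟨p, k, hp, hk1, hkp, hsum⟩)
    · obtain ⟨p, hp, hgd⟩ := (mem_getD_iff _ _).mp h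
      obtain ⟨v, hv, hvu, hpeq, hgv⟩ := pick_v tc u p hu (by omega)
      exact ⟨v, hv, hvu, Or.inl (by rw [hgv, hgd])⟩
    · obtain ⟨v, hv, hvu, hpeq, hgv⟩ := pick_v tc u (t - 2) hu (by omega)
      refine ⟨v, hv, hvu, Or.inr ⟨t - 1, by omega, ?_, ?_⟩⟩
      · rw [hpeq, List.length_eraseIdx_of_lt (by omega : t - 2 < (tc.eraseIdx u).length)]
        omega
      · rw [hpeq, erase_take_sum_gt _ (t - 2) (t - 1) (by omega) (by omega)]
        have he : t - 1 + 1 = t := by omega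
        rw [he, hts, hgv]
        ring
    · obtain ⟨v, hv, hvu, hpeq, hgv⟩ := pick_v tc u p hu (by omega)
      refine ⟨v, hv, hvu, Or.inr ⟨k, hk1, ?_, ?_⟩⟩
      · rw [hpeq, List.length_eraseIdx_of_lt (by omega : p < (tc.eraseIdx u).length)]
        omega
      · rw [hpeq, erase_take_sum_le _ p k hkp, hgv]
        exact hsum


-- ===== VERDICT (by name: the statement is the Claim_ definition above) =====
theorem resolve_test_case_spec : Claim_equal_resolve_test_case := by
  intro tc _
  unfold Spec_resolve_test_case resolve_test_case resolve_test_case_alt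
  by_cases h1 : tc.length = 1
  · match tc, h1 with
    | [x], _ =>
      by_cases hx : x = 1 <;> simp [hx]
  · simp only [h1, false_and, if_false]
    rw [pvLoopOuter_count, pvAllB_all]
    rw [Bool.eq_iff_iff]
    simp only [decide_eq_true_eq, List.all_eq_true]
    have hlen : (PySem.List.enumerate tc 0).length = tc.length := by
      simp [PySem.List.length_enumerate]
    have key : ∀ q ∈ PySem.List.enumerate tc 0,
        pvLoop1 q.1 q.2 (PySem.List.enumerate tc 0) (PySem.List.enumerate tc 0)
          = pvBodyB tc q.1 q.2 := by
      intro q hq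
      rcases (mem_enumerate_iff q tc 0).mp hq with ⟨p, hp, rfl⟩
      simpa using core_eq tc p hp
    constructor
    · intro h q hq
      have hcnt : (PySem.List.enumerate tc 0).countP
          (fun q => pvLoop1 q.1 q.2 (PySem.List.enumerate tc 0) (PySem.List.enumerate tc 0))
          = (PySem.List.enumerate tc 0).length := by omega
      rw [← key q hq]
      exact List.countP_eq_length.mp hcnt q hq
    · intro h
      have hcnt : (PySem.List.enumerate tc 0).countP
          (fun q => pvLoop1 q.1 q.2 (PySem.List.enumerate tc 0) (PySem.List.enumerate tc 0))
          = (PySem.List.enumerate tc 0).length := by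
        refine List.countP_eq_length.mpr ?_
        intro q hq
        rw [key q hq]
        exact h q hq
      omega
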